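-- pv_equiv track=rewrite | github.com/JinyuanSun/lab-gui-tools | lab_gui_tools/peptide_mass_calculator.py | gen_fragment
-- ===== SOURCE A (Python) =====
-- def gen_fragment(peptide):
--     frag_list = []
--     for left, aa in enumerate(peptide):
--         if aa in ['R', 'K']:
--             frag_list.append(peptide[:left+1])
--         for right, _ in enumerate(peptide):
--             if right > left:
--                 if peptide[left:right][-1] in ['R','K'] and peptide[left-1] in ["R", "K"]:
--                     if len(peptide[left:right]) > 1:
--                         frag_list.append(peptide[left:right])
--     return frag_list
-- ===== SOURCE B (Python) =====
-- def gen_fragment(peptide):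
--     n = len(peptide)
--     # cut positions usable as fragment ends inside A's inner loop (right-1 <= n-2)
--     inner = [i for i, aa in enumerate(peptide) if aa in ("R", "K") and i <= n - 2]
--     frags = []
--     j = 0
--     for left in range(n):
--         while j < len(inner) and inner[j] < left + 1:
--             j += 1
--         if peptide[left] in ("R", "K"):
--             frags.append(peptide[: left + 1])
--         if peptide[left - 1] in ("R", "K"):
--             for k in range(j, len(inner)):
--                 frags.append(peptide[left : inner[k] + 1])
--     return frags
-- ===== Notes on version B (the rewrite author's own statement) =====
-- stated objective: faster
-- what changed: B precomputes the list of R/K cut positions once and, for each qualifying left endpoint (previous residue R/K, with Python's index -1 wraparound kept), emits fragments directly from a monotone pointer into that list, replacing A's inner scan over all right endpoints that slices and re-tests the peptide for every (left,right) pair.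
import Mathlib
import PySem

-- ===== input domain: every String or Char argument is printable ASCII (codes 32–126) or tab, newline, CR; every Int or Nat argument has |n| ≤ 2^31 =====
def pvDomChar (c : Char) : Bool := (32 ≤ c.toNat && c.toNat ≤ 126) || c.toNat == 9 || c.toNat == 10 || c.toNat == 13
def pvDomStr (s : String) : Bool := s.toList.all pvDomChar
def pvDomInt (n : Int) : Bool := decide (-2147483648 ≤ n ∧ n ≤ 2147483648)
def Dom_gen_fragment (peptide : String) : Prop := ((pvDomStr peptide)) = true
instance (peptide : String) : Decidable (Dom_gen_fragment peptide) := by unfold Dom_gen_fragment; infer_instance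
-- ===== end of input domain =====

-- B precomputes the R/K cut positions once and emits fragments via a monotone pointer,
-- replacing A's inner scan over all right endpoints (objective: faster).


-- ===== PORT A =====
-- A-side helper: the inner 'for right, _ in enumerate(peptide)' loop
def pvA_inner (cs : List Char) (left : Int) (acc : List String) : List String :=
  (PySem.List.enumerate cs).foldl (fun acc rp =>
    if rp.1 > left then
      let s := PySem.List.slice cs (some left) (some rp.1)
      -- peptide[left:right][-1] / peptide[left-1]: pyGetD is exact here (slice nonempty, index in range)
      if (PySem.List.pyGetD s (-1) ' ' = 'R' ∨ PySem.List.pyGetD s (-1) ' ' = 'K') ∧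
         (PySem.List.pyGetD cs (left - 1) ' ' = 'R' ∨ PySem.List.pyGetD cs (left - 1) ' ' = 'K') then
        if s.length > 1 then acc ++ [String.ofList s] else acc
      else acc
    else acc) acc

def gen_fragment (peptide : String) : List String :=
  let cs := peptide.toList
  (PySem.List.enumerate cs).foldl (fun frag_list la =>
    pvA_inner cs la.1
      (if la.2 = 'R' ∨ la.2 = 'K' then
        frag_list ++ [String.ofList (PySem.List.slice cs none (some (la.1 + 1)))]
      else frag_list)) []

-- ===== PORT B =====
-- B-side helper: the 'while j < len(inner) and inner[j] < lo: j += 1' loop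
def pvB_advance (inner : List Int) (lo : Int) (j : Nat) : Nat :=
  if h : j < inner.length ∧ inner.getD j 0 < lo then pvB_advance inner lo (j + 1) else j
termination_by inner.length - j
decreasing_by omega

def gen_fragment_alt (peptide : String) : List String :=
  let cs := peptide.toList
  let n := cs.length
  let inner := (PySem.List.enumerate cs).filterMap (fun p =>
    if (p.2 = 'R' ∨ p.2 = 'K') ∧ p.1 ≤ (n : Int) - 2 then some p.1 else none)
  ((PySem.List.pyRange 0 (n : Int)).foldl (fun st left =>
    let j := pvB_advance inner (left + 1) st.2
    let frags :=
      if PySem.List.pyGetD cs left ' ' = 'R' ∨ PySem.List.pyGetD cs left ' ' = 'K' then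
        st.1 ++ [String.ofList (PySem.List.slice cs none (some (left + 1)))]
      else st.1
    let frags :=
      if PySem.List.pyGetD cs (left - 1) ' ' = 'R' ∨ PySem.List.pyGetD cs (left - 1) ' ' = 'K' then
        (PySem.List.pyRange (j : Int) (PySem.List.len inner)).foldl (fun acc k =>
          acc ++ [String.ofList (PySem.List.slice cs (some left) (some (PySem.List.pyGetD inner k 0 + 1)))]) frags
      else frags
    (frags, j)) (([] : List String), (0 : Nat))).1

-- ===== PRECONDITION & SPEC =====
def Spec_gen_fragment (peptide : String) (out : List String) : Prop := out = gen_fragment_alt peptide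
instance (peptide : String) (out : List String) : Decidable (Spec_gen_fragment peptide out) := by unfold Spec_gen_fragment; infer_instance

-- ===== CLAIM (what is proved, stated in full; the proofs are below) =====
def Claim_equal_gen_fragment : Prop := ∀ (peptide : String), Dom_gen_fragment peptide → Spec_gen_fragment peptide (gen_fragment peptide)

-- ===== LEMMAS AND PROOFS =====

-- common description: per-left contribution and its concatenation
def pvInner (cs : List Char) : List Nat :=
  (List.range cs.length).filter (fun c => decide ((cs.getD c ' ' = 'R' ∨ cs.getD c ' ' = 'K') ∧ c + 2 ≤ cs.length))

def pvContrib (cs : List Char) (l : Nat) : List String :=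
  (if cs.getD l ' ' = 'R' ∨ cs.getD l ' ' = 'K' then [String.ofList (cs.take (l + 1))] else []) ++
  (if PySem.List.pyGetD cs ((l : Int) - 1) ' ' = 'R' ∨ PySem.List.pyGetD cs ((l : Int) - 1) ' ' = 'K' then
    ((pvInner cs).filter (fun c => decide (l + 1 ≤ c))).map
      (fun c => String.ofList ((cs.drop l).take (c + 1 - l)))
  else [])

def pvSpec (cs : List Char) : List String := (List.range cs.length).flatMap (pvContrib cs)

-- generic bridges
theorem pv_flatMap_enumerate {β : Type} (cs : List Char) (g : Int × Char → List β) :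
    (PySem.List.enumerate cs).flatMap g
      = (List.range cs.length).flatMap (fun (k : Nat) => g ((k : Int), cs.getD k ' ')) := by
  rw [PySem.List.enumerate_eq_map_pyRange cs ' ']
  show (List.map _ (PySem.List.pyRange 0 (cs.length : Int))).flatMap g = _
  rw [PySem.List.pyRange_zero_nat, List.map_map, List.flatMap_map]
  simp [PySem.List.pyGetD_natCast]

theorem pv_shift {α : Type} (m : Nat) (P Q : Nat → Bool) (f g : Nat → α)
    (hP0 : P 0 = false)
    (h : ∀ c, c < m → (Q c = P (c + 1) ∧ (Q c = true → g c = f (c + 1)))) :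
    ((List.range (m + 1)).filter P).map f = ((List.range m).filter Q).map g := by
  induction m with
  | zero => simp [hP0]
  | succ m ih =>
    rw [List.range_succ (n := m + 1)]
    conv_rhs => rw [List.range_succ (n := m)]
    rw [List.filter_append, List.filter_append, List.map_append, List.map_append]
    have h1 := ih (fun c hc => h c (by omega))
    rw [h1]
    congr 1
    obtain ⟨hq, hg⟩ := h m (by omega)
    by_cases hQ : Q m
    · rw [List.filter_singleton]
      simp [hQ, ← hq, hg hQ]
    · simp [hQ, ← hq]

theorem pv_last_slice (cs : List Char) (j r : Nat) (hj : j < r) (hr : r ≤ cs.length) :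
    PySem.List.pyGetD ((cs.drop j).take (r - j)) (-1) ' ' = cs.getD (r - 1) ' ' := by
  have hlen : ((cs.drop j).take (r - j)).length = r - j := by
    simp [List.length_take, List.length_drop]; omega
  have hne : (cs.drop j).take (r - j) ≠ [] := by
    intro h; rw [h] at hlen; simp at hlen; omega
  rw [PySem.List.pyGetD_neg_one _ _ hne, List.getLast_eq_getElem]
  have h1 : r - 1 < cs.length := by omega
  rw [List.getD_eq_getElem cs ' ' h1]
  rw [List.getElem_take, List.getElem_drop]
  congr 1
  omega

-- A = pvSpec
theorem pv_filter_range_top (n : Nat) (Q : Nat → Bool) (h : Q n = false) :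
    (List.range (n + 1)).filter Q = (List.range n).filter Q := by
  rw [List.range_succ, List.filter_append]
  simp [h]

theorem pv_flatMap_ite' {α β : Type} (l : List α) (p : α → Prop) [DecidablePred p] (f : α → β) :
    l.flatMap (fun x => if p x then [f x] else []) = (l.filter (fun x => decide (p x))).map f := by
  induction l with
  | nil => rfl
  | cons x xs ih => by_cases h : p x <;> simp [h, ih]

theorem pvA_inner_eq (cs : List Char) (l : Nat) (hl : l < cs.length) (acc : List String) :
    pvA_inner cs (l : Int) acc
      = acc ++ (if PySem.List.pyGetD cs ((l : Int) - 1) ' ' = 'R' ∨ PySem.List.pyGetD cs ((l : Int) - 1) ' ' = 'K' then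
          ((pvInner cs).filter (fun c => decide (l + 1 ≤ c))).map
            (fun c => String.ofList ((cs.drop l).take (c + 1 - l)))
        else []) := by
  unfold pvA_inner
  -- the loop body appends a (possibly empty) block: turn it into a flatMap over the enumeration
  rw [PySem.List.foldl_congr_mem (PySem.List.enumerate cs) _
      (fun acc rp => acc ++ (if rp.1 > (l : Int) then
          (if ((PySem.List.pyGetD (PySem.List.slice cs (some (l : Int)) (some rp.1)) (-1) ' ' = 'R' ∨
            PySem.List.pyGetD (PySem.List.slice cs (some (l : Int)) (some rp.1)) (-1) ' ' = 'K') ∧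
           (PySem.List.pyGetD cs ((l : Int) - 1) ' ' = 'R' ∨ PySem.List.pyGetD cs ((l : Int) - 1) ' ' = 'K')) then
            (if 1 < (PySem.List.slice cs (some (l : Int)) (some rp.1)).length then
              [String.ofList (PySem.List.slice cs (some (l : Int)) (some rp.1))] else [])
          else []) else [])) acc
      (by intro acc rp _
          by_cases h1 : rp.1 > (l : Int) <;>
            simp only [h1, if_pos, if_neg, not_false_iff] <;>
            first
              | (split_ifs <;> simp)
              | simp)]
  rw [PySem.List.foldl_append_eq_flatMap, pv_flatMap_enumerate]
  congr 1
  -- rewrite each summand into Nat-indexed closed form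
  have hcong : ∀ k ∈ List.range cs.length,
      (if (k : Int) > (l : Int) then
          (if ((PySem.List.pyGetD (PySem.List.slice cs (some (l : Int)) (some (k : Int))) (-1) ' ' = 'R' ∨
            PySem.List.pyGetD (PySem.List.slice cs (some (l : Int)) (some (k : Int))) (-1) ' ' = 'K') ∧
           (PySem.List.pyGetD cs ((l : Int) - 1) ' ' = 'R' ∨ PySem.List.pyGetD cs ((l : Int) - 1) ' ' = 'K')) then
            (if 1 < (PySem.List.slice cs (some (l : Int)) (some (k : Int))).length then
              [String.ofList (PySem.List.slice cs (some (l : Int)) (some (k : Int)))] else [])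
          else []) else [])
      = (if ((cs.getD (k - 1) ' ' = 'R' ∨ cs.getD (k - 1) ' ' = 'K') ∧
           (PySem.List.pyGetD cs ((l : Int) - 1) ' ' = 'R' ∨ PySem.List.pyGetD cs ((l : Int) - 1) ' ' = 'K') ∧
           l + 2 ≤ k) then
          [String.ofList ((cs.drop l).take (k - l))] else []) := by
    intro k hk
    rw [List.mem_range] at hk
    rw [PySem.List.slice_natCast]
    have hlen : ((cs.drop l).take (k - l)).length = min (k - l) (cs.length - l) := by
      simp [List.length_take, List.length_drop]
    by_cases hlk : l < k
    · have hlast := pv_last_slice cs l k hlk (le_of_lt hk)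
      rw [if_pos (by exact_mod_cast hlk : (k : Int) > (l : Int)), hlast]
      by_cases hAB : ((cs.getD (k - 1) ' ' = 'R' ∨ cs.getD (k - 1) ' ' = 'K') ∧
           (PySem.List.pyGetD cs ((l : Int) - 1) ' ' = 'R' ∨ PySem.List.pyGetD cs ((l : Int) - 1) ' ' = 'K'))
      · rw [if_pos hAB]
        by_cases hL : 1 < ((cs.drop l).take (k - l)).length
        · rw [if_pos hL, if_pos ⟨hAB.1, hAB.2, by rw [hlen] at hL; omega⟩]
        · rw [if_neg hL, if_neg (fun h => hL (by rw [hlen]; omega))]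
      · rw [if_neg hAB, if_neg (fun h => hAB ⟨h.1, h.2.1⟩)]
    · rw [if_neg (fun h => hlk (by exact_mod_cast h)), if_neg (fun h => hlk (by omega))]
  rw [List.flatMap_congr hcong]
  -- now compare with the filtered cut list
  by_cases hprev : PySem.List.pyGetD cs ((l : Int) - 1) ' ' = 'R' ∨ PySem.List.pyGetD cs ((l : Int) - 1) ' ' = 'K'
  · rw [if_pos hprev]
    rw [pv_flatMap_ite' (List.range cs.length)
        (fun k => (cs.getD (k - 1) ' ' = 'R' ∨ cs.getD (k - 1) ' ' = 'K') ∧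
           (PySem.List.pyGetD cs ((l : Int) - 1) ' ' = 'R' ∨ PySem.List.pyGetD cs ((l : Int) - 1) ' ' = 'K') ∧
           l + 2 ≤ k)
        (fun k => String.ofList ((cs.drop l).take (k - l)))]
    unfold pvInner
    rw [List.filter_filter]
    rw [List.filter_congr (q := fun k =>
          decide ((cs.getD (k - 1) ' ' = 'R' ∨ cs.getD (k - 1) ' ' = 'K') ∧ l + 2 ≤ k))
        (by intro k _; simp [hprev])]
    obtain ⟨m, hm⟩ : ∃ m, cs.length = m + 1 := ⟨cs.length - 1, by omega⟩
    rw [hm]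
    rw [pv_filter_range_top (n := m)
        (Q := fun c => decide (l + 1 ≤ c) &&
          decide ((cs.getD c ' ' = 'R' ∨ cs.getD c ' ' = 'K') ∧ c + 2 ≤ m + 1))
        (by apply Bool.and_eq_false_iff.mpr; right; apply decide_eq_false; rintro ⟨-, h⟩; omega)]
    apply pv_shift
    · apply decide_eq_false; rintro ⟨-, h⟩; omega
    · intro c hc
      refine ⟨?_, fun _ => rfl⟩
      rw [← Bool.decide_and, decide_eq_decide]
      simp only [Nat.add_sub_cancel]
      constructor
      · rintro ⟨h1, h2, -⟩
        exact ⟨h2, by omega⟩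
      · rintro ⟨h1, h2⟩
        exact ⟨by omega, h1, by omega⟩
  · rw [if_neg hprev]
    rw [List.flatMap_congr (l := List.range cs.length) (g := fun (_ : Nat) => ([] : List String))
        (by intro k _; rw [if_neg (fun h => hprev h.2.1)])]
    simp


theorem pvA_eq (peptide : String) : gen_fragment peptide = pvSpec peptide.toList := by
  unfold gen_fragment pvSpec
  show List.foldl _ [] (PySem.List.enumerate peptide.toList) = _
  rw [PySem.List.foldl_congr_mem (PySem.List.enumerate peptide.toList) _
      (fun acc la => acc ++ pvContrib peptide.toList la.1.toNat) [] ?_]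
  · rw [PySem.List.foldl_append_eq_flatMap, pv_flatMap_enumerate]
    simp
  · intro acc la hla
    rw [PySem.List.mem_enumerate_iff] at hla
    obtain ⟨k, hk, rfl⟩ := hla
    simp only [zero_add]
    rw [pvA_inner_eq peptide.toList k hk]
    unfold pvContrib
    have h1 : PySem.List.slice peptide.toList none (some ((k : Int) + 1)) = peptide.toList.take (k + 1) := by
      have : ((k : Int) + 1) = ((k + 1 : Nat) : Int) := by push_cast; ring
      rw [this, PySem.List.slice_to_natCast]
    have h2 : peptide.toList.getD k ' ' = peptide.toList[k] := List.getD_eq_getElem _ _ hk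
    rw [h1, Int.toNat_natCast, h2]
    by_cases hRK : peptide.toList[k] = 'R' ∨ peptide.toList[k] = 'K' <;>
      simp [hRK, List.append_assoc]

-- B = pvSpec
theorem pv_map_filter_ite {α β : Type} (l : List α) (p : α → Bool) (f : α → β) :
    (l.filter p).map f = l.filterMap (fun a => if p a then some (f a) else none) := by
  induction l with
  | nil => rfl
  | cons x xs ih => by_cases h : p x <;> simp [h, ih]

theorem pv_inner_cast (cs : List Char) :
    (PySem.List.enumerate cs).filterMap (fun p =>
      if (p.2 = 'R' ∨ p.2 = 'K') ∧ p.1 ≤ (cs.length : Int) - 2 then some p.1 else none)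
      = (pvInner cs).map (fun (c : Nat) => (c : Int)) := by
  rw [PySem.List.enumerate_eq_map_pyRange cs ' ']
  show (List.map _ (PySem.List.pyRange 0 (cs.length : Int))).filterMap _ = _
  rw [PySem.List.pyRange_zero_nat, List.map_map, List.filterMap_map]
  unfold pvInner
  rw [pv_map_filter_ite]
  apply List.filterMap_congr
  intro k hk
  rw [List.mem_range] at hk
  simp only [Function.comp]
  have h2 : cs.getD k ' ' = PySem.List.pyGetD cs ((k : Nat) : Int) ' ' := by
    rw [PySem.List.pyGetD_natCast]
  rw [← h2]
  have hiff : ((cs.getD k ' ' = 'R' ∨ cs.getD k ' ' = 'K') ∧ (k : Int) ≤ (cs.length : Int) - 2)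
      ↔ ((cs.getD k ' ' = 'R' ∨ cs.getD k ' ' = 'K') ∧ k + 2 ≤ cs.length) := by
    constructor
    · rintro ⟨h1, h3⟩; exact ⟨h1, by omega⟩
    · rintro ⟨h1, h3⟩; exact ⟨h1, by omega⟩
  rw [if_congr hiff rfl rfl]
  rw [if_congr (Iff.comm.mp decide_eq_true_iff.symm) rfl rfl]

theorem pv_inner_sorted (cs : List Char) :
    ((pvInner cs).map (fun (c : Nat) => (c : Int))).Pairwise (· < ·) := by
  rw [List.pairwise_map]
  apply List.Pairwise.imp (fun h => by exact_mod_cast h)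
  exact List.Pairwise.filter _ List.pairwise_lt_range

theorem pv_advance_spec (inner : List Int) (hs : inner.Pairwise (· < ·)) (lo : Int) (j : Nat)
    (hj : j ≤ inner.length) (hpre : ∀ i (hi : i < inner.length), i < j → inner[i] < lo) :
    pvB_advance inner lo j ≤ inner.length ∧
    (∀ i (hi : i < inner.length), i < pvB_advance inner lo j → inner[i] < lo) ∧
    inner.drop (pvB_advance inner lo j) = inner.filter (fun c => decide (lo ≤ c)) := by
  fun_induction pvB_advance inner lo j with
  | case1 j h ih =>
    exact ih h.1 (fun i hi hij => by
      rcases Nat.lt_or_ge i j with hlt | hge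
      · exact hpre i hi hlt
      · have : i = j := by omega
        subst this
        rw [← List.getD_eq_getElem inner 0 hi]
        exact h.2)
  | case2 j h =>
    refine ⟨hj, hpre, ?_⟩
    have hkey : ∀ i (hi : i < inner.length), i ≥ j → lo ≤ inner[i] := by
      intro i hi hij
      rcases Nat.lt_or_ge j inner.length with hjl | hjl
      · have h1 : lo ≤ inner[j] := by
          have := h
          rw [not_and_or] at this
          rcases this with h' | h'
          · omega
          · rw [List.getD_eq_getElem inner 0 hjl] at h'
            omega
        rcases Nat.eq_or_lt_of_le hij with rfl | hlt
        · exact h1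
        · have := List.pairwise_iff_getElem.mp hs j i hjl hi hlt
          omega
      · omega
    have hsplit : inner.filter (fun c => decide (lo ≤ c))
        = (inner.take j).filter (fun c => decide (lo ≤ c)) ++ (inner.drop j).filter (fun c => decide (lo ≤ c)) := by
      rw [← List.filter_append, List.take_append_drop]
    rw [hsplit]
    have h1 : (inner.take j).filter (fun c => decide (lo ≤ c)) = [] := by
      rw [List.filter_eq_nil_iff]
      intro a ha
      rw [List.mem_take_iff_getElem] at ha
      obtain ⟨i, hi, rfl⟩ := ha
      have := hpre i (by omega) (by omega)
      simp only [decide_eq_true_iff]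
      omega
    have h2 : (inner.drop j).filter (fun c => decide (lo ≤ c)) = inner.drop j := by
      rw [List.filter_eq_self]
      intro a ha
      rw [List.mem_iff_getElem] at ha
      obtain ⟨i, hi, rfl⟩ := ha
      rw [List.getElem_drop]
      have := hkey (j + i) (by simp at hi; omega) (by omega)
      simp only [decide_eq_true_iff]
      exact this
    rw [h1, h2, List.nil_append]

theorem pvB_fold (cs : List Char) (L : Nat) (hL : L ≤ cs.length) :
    ∃ j, (PySem.List.pyRange 0 (L : Int)).foldl (fun st left =>
      let j := pvB_advance ((pvInner cs).map (fun (c : Nat) => (c : Int))) (left + 1) st.2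
      let frags :=
        if PySem.List.pyGetD cs left ' ' = 'R' ∨ PySem.List.pyGetD cs left ' ' = 'K' then
          st.1 ++ [String.ofList (PySem.List.slice cs none (some (left + 1)))]
        else st.1
      let frags :=
        if PySem.List.pyGetD cs (left - 1) ' ' = 'R' ∨ PySem.List.pyGetD cs (left - 1) ' ' = 'K' then
          (PySem.List.pyRange (j : Int) (PySem.List.len ((pvInner cs).map (fun (c : Nat) => (c : Int))))).foldl (fun acc k =>
            acc ++ [String.ofList (PySem.List.slice cs (some left)
              (some (PySem.List.pyGetD ((pvInner cs).map (fun (c : Nat) => (c : Int))) k 0 + 1)))]) frags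
        else frags
      (frags, j)) (([] : List String), (0 : Nat))
    = ((List.range L).flatMap (pvContrib cs), j) ∧ j ≤ (pvInner cs).length ∧
      (∀ i (hi : i < (pvInner cs).length), i < j → (pvInner cs)[i] < L) := by
  induction L with
  | zero =>
    refine ⟨0, ?_, by omega, fun i hi h => by omega⟩
    rw [show ((0 : Nat) : Int) = 0 from rfl, PySem.List.pyRange_zero]
    rfl
  | succ L ih =>
    obtain ⟨j, hfold, hjle, hjlt⟩ := ih (by omega)
    have hrange : PySem.List.pyRange 0 ((L + 1 : Nat) : Int)
        = PySem.List.pyRange 0 (L : Int) ++ [(L : Int)] := by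
      rw [show ((L + 1 : Nat) : Int) = (L : Int) + 1 by push_cast; ring]
      exact PySem.List.pyRange_one_succ_right (by positivity)
    rw [hrange, List.foldl_append, hfold]
    -- one step of the loop at left = L
    set innerI := (pvInner cs).map (fun (c : Nat) => (c : Int)) with hinnerI
    have hlenI : innerI.length = (pvInner cs).length := by simp [hinnerI]
    obtain ⟨hj'le, hj'lt, hj'drop⟩ := pv_advance_spec innerI (pv_inner_sorted cs) ((L : Int) + 1)
      j (by omega)
      (fun i hi hij => by
        have := hjlt i (by omega) hij
        have hgi : innerI[i] = ((pvInner cs)[i]'(by omega) : Int) := by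
          simp [hinnerI]
        rw [hgi]
        omega)
    set j' := pvB_advance innerI ((L : Int) + 1) j with hj'
    refine ⟨j', ?_, by omega, fun i hi hij => by
      have := hj'lt i (by omega) hij
      have hgi : innerI[i]'(by omega) = ((pvInner cs)[i] : Int) := by simp [hinnerI]
      rw [hgi] at this
      omega⟩
    show (_, _) = (_, _)
    simp only []
    congr 1
    -- the accumulated fragments gain exactly pvContrib cs L
    rw [List.range_succ, List.flatMap_append, List.flatMap_singleton]
    -- emission loop: fold over pyRange j' .. len = map over the dropped suffix
    have hemit : ∀ init : List String, (PySem.List.pyRange (j' : Int) (PySem.List.len innerI)).foldl (fun acc k =>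
          acc ++ [String.ofList (PySem.List.slice cs (some (L : Int))
            (some (PySem.List.pyGetD innerI k 0 + 1)))]) init
        = init ++ ((pvInner cs).filter (fun c => decide (L + 1 ≤ c))).map
            (fun c => String.ofList ((cs.drop L).take (c + 1 - L))) := by
      intro init
      rw [PySem.List.foldl_pyRange_pyGetD innerI 0
        (fun acc c => acc ++ [String.ofList (PySem.List.slice cs (some (L : Int)) (some (c + 1)))])
        init (by positivity)]
      rw [Int.toNat_natCast, hj'drop]
      rw [hinnerI, List.filter_map, List.foldl_map]
      rw [PySem.List.foldl_append_singleton_eq_map]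
      congr 1
      rw [List.filter_congr (l := pvInner cs)
          (q := fun c => decide (L + 1 ≤ c))
          (by intro c _; simp only [Function.comp, decide_eq_decide]; omega)]
      apply List.map_congr_left
      intro c _
      have hc1 : ((c : Int) + 1) = ((c + 1 : Nat) : Int) := by push_cast; ring
      rw [hc1, PySem.List.slice_natCast]
    rw [← hj', hemit]
    -- prefix append and assembly
    unfold pvContrib
    have hpre : PySem.List.pyGetD cs ((L : Int)) ' ' = cs.getD L ' ' := PySem.List.pyGetD_natCast cs L ' '
    have hslice : PySem.List.slice cs none (some ((L : Int) + 1)) = cs.take (L + 1) := by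
      rw [show ((L : Int) + 1) = ((L + 1 : Nat) : Int) by push_cast; ring, PySem.List.slice_to_natCast]
    rw [hpre, hslice]
    simp only [List.getD_eq_getElem?_getD]
    by_cases h1 : cs[L]?.getD ' ' = 'R' ∨ cs[L]?.getD ' ' = 'K' <;>
      by_cases h2 : PySem.List.pyGetD cs ((L : Int) - 1) ' ' = 'R' ∨ PySem.List.pyGetD cs ((L : Int) - 1) ' ' = 'K' <;>
      simp [h1, h2, List.append_assoc]

theorem pvB_eq (peptide : String) : gen_fragment_alt peptide = pvSpec peptide.toList := by
  unfold gen_fragment_alt pvSpec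
  show (List.foldl _ (([] : List String), (0 : Nat))
      (PySem.List.pyRange 0 ((peptide.toList.length : Nat) : Int))).1 = _
  rw [pv_inner_cast]
  obtain ⟨j, hfold, -, -⟩ := pvB_fold peptide.toList peptide.toList.length le_rfl
  rw [hfold]

-- ===== VERDICT (by name: the statement is the Claim_ definition above) =====
theorem gen_fragment_spec : Claim_equal_gen_fragment := by
  intro peptide _
  unfold Spec_gen_fragment
  rw [pvA_eq, pvB_eq]
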